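-- pv_equiv track=rewrite | github.com/img14/Programs_Public | ClassPrograms/Vigenere/vigenere.py | split_by_keyword
-- ===== SOURCE A (Python) =====
-- def split_by_keyword(eithertext, keyword):
-- 	list_of_split_strings = []
-- 	for i in range(len(keyword)):
-- 		string = ""
-- 		x = i
-- 		while x < len(eithertext):
-- 			string = string + eithertext[x]
-- 			x = x + len(keyword)
-- 		list_of_split_strings.append(string)
-- 	return list_of_split_strings
-- ===== SOURCE B (Python) =====
-- def split_by_keyword(eithertext, keyword):
--     k = len(keyword)
--     if k == 0:
--         return []
--     buckets = [""] * k
--     j = 0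
--     for ch in eithertext:
--         buckets[j % k] += ch
--         j += 1
--     return buckets
-- ===== Notes on version B (the rewrite author's own statement) =====
-- stated objective: simpler
-- what changed: Replaces A's len(keyword) nested stride passes over the text with a single left-to-right pass that appends each character to bucket j % len(keyword).
import Mathlib
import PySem

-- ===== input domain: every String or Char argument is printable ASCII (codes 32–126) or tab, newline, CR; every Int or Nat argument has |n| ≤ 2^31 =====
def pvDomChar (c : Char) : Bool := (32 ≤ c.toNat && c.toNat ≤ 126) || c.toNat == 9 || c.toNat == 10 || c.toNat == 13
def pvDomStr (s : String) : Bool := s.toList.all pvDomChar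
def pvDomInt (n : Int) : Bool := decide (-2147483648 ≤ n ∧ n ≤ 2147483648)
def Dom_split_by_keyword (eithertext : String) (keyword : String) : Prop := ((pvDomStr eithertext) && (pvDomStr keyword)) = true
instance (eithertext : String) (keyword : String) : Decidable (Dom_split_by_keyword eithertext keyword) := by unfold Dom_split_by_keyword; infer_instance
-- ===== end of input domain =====

-- B replaces A's len(keyword) stride passes over the text with one left-to-right
-- pass dispatching each character to bucket j % len(keyword) (objective: simpler).

-- ===== PORT A =====
-- inner 'while x < len(eithertext)' loop; fuel bounds the iteration count
-- (each step adds k ≥ 1 to x whenever it fires, so fuel = eithertext length suffices)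
def pvAloop (fuel : Nat) (t : List Char) (k : Nat) (x : Nat) (acc : List Char) : List Char :=
  match fuel with
  | 0 => acc
  | fuel + 1 =>
    if h : x < t.length then pvAloop fuel t k (x + k) (acc ++ [t[x]]) else acc

def split_by_keyword (eithertext : String) (keyword : String) : List String :=
  let t := eithertext.toList
  let k := keyword.toList.length
  (List.range k).foldl
    (fun lst i => lst ++ [String.mk (pvAloop t.length t k i [])]) []

-- ===== PORT B =====
-- 'for ch in eithertext: buckets[j % k] += ch; j += 1'
def pvBloop (k : Nat) : List Char → Nat → List (List Char) → List (List Char)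
  | [], _, bs => bs
  | c :: rest, j, bs => pvBloop k rest (j + 1) (bs.modify (j % k) (· ++ [c]))

def split_by_keyword_alt (eithertext : String) (keyword : String) : List String :=
  let k := keyword.toList.length
  if k = 0 then []
  else (pvBloop k eithertext.toList 0 (List.replicate k [])).map String.mk

-- ===== PRECONDITION & SPEC =====
def Spec_split_by_keyword (eithertext : String) (keyword : String) (out : List String) : Prop := out = split_by_keyword_alt eithertext keyword
instance (eithertext : String) (keyword : String) (out : List String) : Decidable (Spec_split_by_keyword eithertext keyword out) := by unfold Spec_split_by_keyword; infer_instance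

-- ===== CLAIM (what is proved, stated in full; the proofs are below) =====
def Claim_equal_split_by_keyword : Prop := ∀ (eithertext : String) (keyword : String), Dom_split_by_keyword eithertext keyword → Spec_split_by_keyword eithertext keyword (split_by_keyword eithertext keyword)

-- ===== LEMMAS AND PROOFS =====

-- the characters of t at positions ≡ i (mod k), as a one-by-one scan from position j
def pvSel (k i : Nat) : List Char → Nat → List Char
  | [], _ => []
  | c :: rest, j => (if j % k = i then [c] else []) ++ pvSel k i rest (j + 1)

theorem pv_mod_ne {x d k i : Nat} (hd0 : 0 < d) (hdk : d < k) (hik : i < k)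
    (h : (x + d) % k = i) : x % k ≠ i := by
  intro hx
  have h1 : (x + d) % k = (x % k + d % k) % k := Nat.add_mod x d k
  rw [hx, Nat.mod_eq_of_lt hdk] at h1
  rcases Nat.lt_or_ge (i + d) k with hlt | hge
  · rw [Nat.mod_eq_of_lt hlt] at h1; omega
  · have h2 : (i + d) % k = (i + d - k) % k := Nat.mod_eq_sub_mod hge
    have h3 : i + d - k < k := by omega
    rw [h2, Nat.mod_eq_of_lt h3] at h1; omega

theorem pv_aloop_sel (t : List Char) (k i : Nat) (hik : i < k) :
    ∀ m x d acc f, t.length - x ≤ m → t.length - (x + d) ≤ f → d < k →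
      (x + d) % k = i →
      acc ++ pvSel k i (t.drop x) x = pvAloop f t k (x + d) acc := by
  intro m
  induction m with
  | zero =>
    intro x d acc f hm hf hdk hmod
    have hx : t.length ≤ x := by omega
    rw [List.drop_eq_nil_of_le hx]
    cases f with
    | zero => simp [pvSel, pvAloop]
    | succ f => simp [pvSel, pvAloop]; omega
  | succ m ih =>
    intro x d acc f hm hf hdk hmod
    by_cases hx : x < t.length
    · rw [List.drop_eq_getElem_cons hx]
      rcases Nat.eq_zero_or_pos d with hd0 | hd0
      · subst hd0
        have hxi : x % k = i := by simpa using hmod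
        obtain ⟨f', rfl⟩ : ∃ f', f = f' + 1 := by
          cases f with
          | zero => omega
          | succ f => exact ⟨f, rfl⟩
        simp only [pvSel, pvAloop, Nat.add_zero, dif_pos hx, hxi]
        have hxk : x + 1 + (k - 1) = x + k := by omega
        have hrec := ih (x + 1) (k - 1) (acc ++ [t[x]]) f'
          (by omega) (by omega) (by omega)
          (by rw [hxk, Nat.add_mod_right]; exact hxi)
        rw [hxk] at hrec
        rw [← hrec]
        simp [List.append_assoc]
      · have hxi : x % k ≠ i := pv_mod_ne hd0 hdk hik hmod
        simp only [pvSel, if_neg hxi, List.nil_append]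
        have := ih (x + 1) (d - 1) acc f (by omega)
          (by omega)
          (by omega)
          (by rw [show x + 1 + (d - 1) = x + d from by omega]; exact hmod)
        have hxd : x + 1 + (d - 1) = x + d := by omega
        rw [hxd] at this
        exact this
    · have hx' : t.length ≤ x := by omega
      rw [List.drop_eq_nil_of_le hx']
      cases f with
      | zero => simp [pvSel, pvAloop]
      | succ f => simp [pvSel, pvAloop]; omega

theorem pv_bloop_getElem? (k i : Nat) (hik : i < k) :
    ∀ (s : List Char) (j : Nat) (bs : List (List Char)), bs.length = k →
      (pvBloop k s j bs)[i]? = bs[i]?.map (· ++ pvSel k i s j) := by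
  intro s
  induction s with
  | nil => intro j bs hbs; simp [pvBloop, pvSel]
  | cons c rest ih =>
    intro j bs hbs
    rw [pvBloop, ih _ _ (by simp [hbs]), List.getElem?_modify]
    have hjk : j % k < k := Nat.mod_lt _ (by omega)
    simp only [pvSel]
    by_cases hji : j % k = i
    · subst hji
      cases h : bs[j % k]? with
      | none => simp
      | some b => simp
    · rw [if_neg hji]
      cases h : bs[i]? with
      | none => simp
      | some b => simp [hji]

theorem pv_foldl_append_map {α β : Type} (f : α → β) :
    ∀ (l : List α) (acc : List β),
      l.foldl (fun lst i => lst ++ [f i]) acc = acc ++ l.map f := by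
  intro l
  induction l with
  | nil => intro acc; simp
  | cons a l ih => intro acc; simp [List.foldl_cons, ih, List.append_assoc]

-- ===== VERDICT (by name: the statement is the Claim_ definition above) =====
theorem split_by_keyword_spec : Claim_equal_split_by_keyword := by
  intro eithertext keyword _
  unfold Spec_split_by_keyword split_by_keyword split_by_keyword_alt
  set t := eithertext.toList with ht
  set k := keyword.toList.length with hk
  simp only []
  by_cases hk0 : k = 0
  · simp [hk0]
  · rw [if_neg hk0, pv_foldl_append_map]
    have hlen : (pvBloop k t 0 (List.replicate k ([] : List Char))).map String.mk
        = (List.range k).map (fun i => String.mk (pvAloop t.length t k i [])) := by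
      apply List.ext_getElem?
      intro i
      by_cases hik : i < k
      · rw [List.getElem?_map, List.getElem?_map,
          pv_bloop_getElem? k i hik _ _ _ (by simp),
          List.getElem?_replicate, if_pos hik, List.getElem?_range hik]
        simp only [Option.map_some]
        have := pv_aloop_sel t k i hik t.length 0 i [] t.length
          (by omega) (by omega) hik (by simpa using Nat.mod_eq_of_lt hik)
        simp only [List.drop_zero, List.nil_append] at this
        rw [Nat.zero_add] at this
        simp [this]
      · have h1 : (pvBloop k t 0 (List.replicate k ([] : List Char))).length = k := by
          have : ∀ (s : List Char) (j : Nat) (bs : List (List Char)),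
              (pvBloop k s j bs).length = bs.length := by
            intro s
            induction s with
            | nil => intro j bs; simp [pvBloop]
            | cons c rest ih => intro j bs; simp [pvBloop, ih]
          simp [this]
        rw [List.getElem?_eq_none (by simp [h1]; omega),
          List.getElem?_eq_none (by simp; omega)]
    simp [hlen]
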